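-- pv_equiv track=rewrite | github.com/NamanRC/cv-extraction-accio | score.py | score_college
-- ===== SOURCE A (Python) =====
-- TIER1_COLLEGES = [
--     "indian institute of technology",
--     "iit",
--     "indian institute of science",
--     "iisc",
--     "mit",
--     "stanford",
--     "carnegie mellon",
--     "cmu",
--     "uc berkeley",
--     "university of california, berkeley",
--     "caltech",
--     "georgia tech",
--     "university of texas",
--     "university of washington",
--     "eth zurich",
--     "oxford",
--     "cambridge",
--     "harvard",
--     "princeton",
--     "columbia university",
--     "university of illinois",
--     "bits pilani",
--     "iiit hyderabad",
-- ]
--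
-- TIER2_COLLEGES = [
--     "nit",
--     "national institute of technology",
--     "dtu",
--     "delhi technological",
--     "jadavpur",
--     "vit",
--     "manipal",
--     "thapar",
--     "psg",
--     "university of michigan",
--     "university of toronto",
--     "purdue",
--     "ucla",
--     "nyu",
--     "university of southern california",
--     "usc",
--     "university of maryland",
--     "northeastern",
-- ]
--
-- def _lower(val):
--     return (val or "").lower().strip()
--
-- def score_college(education: list[dict]) -> tuple[int, list[str]]:
--     """0-15 points. Best college wins."""
--     best = 0
--     reasons = []
--     for edu in education:
--         college = _lower(edu.get("college"))
--         if not college: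
--             continue
--         if any(t in college for t in TIER1_COLLEGES):
--             if best < 15:
--                 best = 15
--                 reasons = [f"Tier-1 college: {edu['college']}"]
--         elif any(t in college for t in TIER2_COLLEGES):
--             if best < 9:
--                 best = 9
--                 reasons = [f"Tier-2 college: {edu['college']}"]
--         else:
--             if best < 4:
--                 best = 4
--                 reasons = [f"Other college: {edu['college']}"]
--     if not reasons:
--         reasons = ["No education data"]
--     return best, reasons
-- ===== SOURCE B (Python) =====
-- TIER1_COLLEGES = [
--     "indian institute of technology",
--     "iit",
--     "indian institute of science",
--     "iisc",
--     "mit",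
--     "stanford",
--     "carnegie mellon",
--     "cmu",
--     "uc berkeley",
--     "university of california, berkeley",
--     "caltech",
--     "georgia tech",
--     "university of texas",
--     "university of washington",
--     "eth zurich",
--     "oxford",
--     "cambridge",
--     "harvard",
--     "princeton",
--     "columbia university",
--     "university of illinois",
--     "bits pilani",
--     "iiit hyderabad",
-- ]
--
-- TIER2_COLLEGES = [
--     "nit",
--     "national institute of technology",
--     "dtu",
--     "delhi technological",
--     "jadavpur",
--     "vit",
--     "manipal",
--     "thapar",
--     "psg",
--     "university of michigan",
--     "university of toronto",
--     "purdue",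
--     "ucla",
--     "nyu",
--     "university of southern california",
--     "usc",
--     "university of maryland",
--     "northeastern",
-- ]
--
-- _LABELS = {15: "Tier-1 college", 9: "Tier-2 college", 4: "Other college"}
--
-- def _tier(edu):
--     """Tier value of one entry, or None if it has no usable college."""
--     college = (edu.get("college") or "").lower().strip()
--     if not college:
--         return None
--     if any(t in college for t in TIER1_COLLEGES):
--         return 15
--     if any(t in college for t in TIER2_COLLEGES):
--         return 9
--     return 4
--
-- def score_college(education: list[dict]) -> tuple[int, list[str]]:
--     """0-15 points. Best college wins."""
--     tiers = [_tier(edu) for edu in education]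
--     best = max((t for t in tiers if t is not None), default=0)
--     if best == 0:
--         return 0, ["No education data"]
--     idx = tiers.index(best)
--     return best, [f"{_LABELS[best]}: {education[idx]['college']}"]
-- ===== Notes on version B (the rewrite author's own statement) =====
-- stated objective: alternative
-- what changed: A's single loop that mutates a (best, reasons) accumulator is replaced by a two-pass decomposition: classify every entry to an optional tier value, take the max (default 0), then locate the first entry achieving it and build the one reason string from a label table.
import Mathlib
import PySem

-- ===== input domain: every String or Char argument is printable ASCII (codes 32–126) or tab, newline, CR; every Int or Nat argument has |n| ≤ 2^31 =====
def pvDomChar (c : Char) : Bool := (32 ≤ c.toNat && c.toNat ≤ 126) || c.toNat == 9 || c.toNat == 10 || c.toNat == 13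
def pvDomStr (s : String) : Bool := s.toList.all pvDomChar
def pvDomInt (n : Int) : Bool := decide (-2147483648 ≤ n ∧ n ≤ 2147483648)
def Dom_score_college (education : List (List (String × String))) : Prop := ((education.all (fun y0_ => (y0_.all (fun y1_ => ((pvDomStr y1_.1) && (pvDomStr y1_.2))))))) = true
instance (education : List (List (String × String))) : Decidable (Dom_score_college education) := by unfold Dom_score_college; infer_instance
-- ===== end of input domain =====

-- B replaces A's single accumulating loop by a two-pass decomposition (classify each entry to a
-- tier, take the max, then locate the first entry achieving it); objective: alternative structure.

-- ===== PORT A =====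
-- module constants TIER1_COLLEGES / TIER2_COLLEGES (shared module context of both Pythons)
def pvTier1 : List String :=
  ["indian institute of technology", "iit", "indian institute of science", "iisc", "mit",
   "stanford", "carnegie mellon", "cmu", "uc berkeley", "university of california, berkeley",
   "caltech", "georgia tech", "university of texas", "university of washington", "eth zurich",
   "oxford", "cambridge", "harvard", "princeton", "columbia university",
   "university of illinois", "bits pilani", "iiit hyderabad"]

def pvTier2 : List String :=
  ["nit", "national institute of technology", "dtu", "delhi technological", "jadavpur", "vit",
   "manipal", "thapar", "psg", "university of michigan", "university of toronto", "purdue",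
   "ucla", "nyu", "university of southern california", "usc", "university of maryland",
   "northeastern"]

-- _lower(val) = (val or "").lower().strip() applied to edu.get("college") : Option String;
-- 'val or ""' maps both None and "" to "", which .getD "" reproduces exactly here
def pvLowerOpt (val : Option String) : String :=
  PySem.Str.strip (PySem.Str.lower (val.getD ""))

-- edu['college'] as used in the f-strings: the key is present whenever that line runs
-- (the lowered college is non-empty), so .getD "" is exact there
def pvRawCollege (edu : List (String × String)) : String :=
  ((PySem.Dict.mk edu).get? "college").getD ""

-- the body of A's for-loop: one step of the fold over the state (best, reasons)
def pvStepA (st : Int × List String) (edu : List (String × String)) : Int × List String :=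
  let college := pvLowerOpt ((PySem.Dict.mk edu).get? "college")
  if college = "" then st
  else if pvTier1.any (fun t => PySem.Str.isIn t college) then
    (if st.1 < 15 then (15, ["Tier-1 college: " ++ pvRawCollege edu]) else st)
  else if pvTier2.any (fun t => PySem.Str.isIn t college) then
    (if st.1 < 9 then (9, ["Tier-2 college: " ++ pvRawCollege edu]) else st)
  else
    (if st.1 < 4 then (4, ["Other college: " ++ pvRawCollege edu]) else st)

def score_college (education : List (List (String × String))) : Int × List String :=
  let st := education.foldl pvStepA (0, [])
  (st.1, if st.2.isEmpty then ["No education data"] else st.2)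

-- ===== PORT B =====
-- _LABELS dict of Source B
def pvLabels : PySem.Dict Int String :=
  PySem.Dict.mk [(15, "Tier-1 college"), (9, "Tier-2 college"), (4, "Other college")]

-- _tier(edu) of Source B: tier value of one entry, none if it has no usable college
def pvTierOf (edu : List (String × String)) : Option Int :=
  let college := PySem.Str.strip (PySem.Str.lower (((PySem.Dict.mk edu).get? "college").getD ""))
  if college = "" then none
  else if pvTier1.any (fun t => PySem.Str.isIn t college) then some 15
  else if pvTier2.any (fun t => PySem.Str.isIn t college) then some 9
  else some 4

def score_college_alt (education : List (List (String × String))) : Int × List String :=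
  let tiers := education.map pvTierOf
  let best := (PySem.List.max? (tiers.filterMap (fun t => t)) (fun y => y)).getD 0
  if best = 0 then (0, ["No education data"])
  else
    -- tiers.index(best): best ∈ tiers here, so .getD 0 is exact; education[idx] is in range
    let idx := (PySem.List.index? tiers (some best)).getD 0
    (best, [pvLabels.getD best "" ++ ": " ++
            pvRawCollege ((PySem.List.pyGet? education (idx : Int)).getD [])])

-- ===== PRECONDITION & SPEC =====
def Spec_score_college (education : List (List (String × String))) (out : Int × List String) : Prop := out = score_college_alt education
instance (education : List (List (String × String))) (out : Int × List String) : Decidable (Spec_score_college education out) := by unfold Spec_score_college; infer_instance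

-- ===== CLAIM (what is proved, stated in full; the proofs are below) =====
def Claim_equal_score_college : Prop := ∀ (education : List (List (String × String))), Dom_score_college education → Spec_score_college education (score_college education)

-- ===== LEMMAS AND PROOFS =====

-- B's best tier value over the whole list
def pvBest (l : List (List (String × String))) : Int :=
  (PySem.List.max? ((l.map pvTierOf).filterMap (fun t => t)) (fun y => y)).getD 0

-- B's result in canonical shape (empty reasons when best = 0); A's fold reaches exactly this
def pvRes (l : List (List (String × String))) : Int × List String :=
  if pvBest l = 0 then (0, [])
  else (pvBest l,
        [pvLabels.getD (pvBest l) "" ++ ": " ++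
         pvRawCollege ((PySem.List.pyGet? l
           (((PySem.List.index? (l.map pvTierOf) (some (pvBest l))).getD 0 : Nat) : Int)).getD [])])

theorem pvTierOf_mem (edu : List (String × String)) (v : Int) (h : pvTierOf edu = some v) :
    v = 15 ∨ v = 9 ∨ v = 4 := by
  unfold pvTierOf at h
  dsimp only at h
  split_ifs at h <;> simp_all

-- A's loop body, expressed through B's per-entry classifier
theorem pvStepA_char (st : Int × List String) (edu : List (String × String)) :
    pvStepA st edu =
      (pvTierOf edu).elim st
        (fun v => if st.1 < v then (v, [pvLabels.getD v "" ++ ": " ++ pvRawCollege edu]) else st) := by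
  unfold pvStepA pvTierOf pvLowerOpt
  dsimp only
  split_ifs <;> simp_all [pvLabels] <;> congr 1

theorem pvFilt_nonneg (l : List (List (String × String))) (x : Int)
    (hx : x ∈ (l.map pvTierOf).filterMap (fun t => t)) : 0 ≤ x := by
  simp only [List.mem_filterMap, List.mem_map] at hx
  obtain ⟨t, ⟨e, _, he⟩, hteq⟩ := hx
  subst he; rcases pvTierOf_mem e x hteq with h | h | h <;> omega

theorem pvBest_eq_foldl (l : List (List (String × String))) :
    pvBest l = ((l.map pvTierOf).filterMap (fun t => t)).foldl max 0 := by
  unfold pvBest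
  cases hxs : (l.map pvTierOf).filterMap (fun t => t) with
  | nil => rfl
  | cons x t =>
    rw [PySem.List.max?_id_cons]
    simp only [Option.getD_some, List.foldl_cons]
    have hx : 0 ≤ x := pvFilt_nonneg l x (by rw [hxs]; exact List.mem_cons_self)
    rw [max_eq_right hx]

theorem pvBest_append (l : List (List (String × String))) (e : List (String × String)) :
    pvBest (l ++ [e]) = (pvTierOf e).elim (pvBest l) (fun v => max (pvBest l) v) := by
  rw [pvBest_eq_foldl, pvBest_eq_foldl, List.map_append, List.filterMap_append,
      List.foldl_append]
  cases h : pvTierOf e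
  · simp only [h, List.map_cons, List.map_nil, List.filterMap_cons, List.filterMap_nil,
      List.foldl_nil, Option.elim]
  · simp only [h, List.map_cons, List.map_nil, List.filterMap_cons, List.filterMap_nil,
      List.foldl_cons, List.foldl_nil, Option.elim]

theorem le_pvBest (l : List (List (String × String))) (v : Int)
    (h : some v ∈ l.map pvTierOf) : v ≤ pvBest l := by
  unfold pvBest
  have hv : v ∈ (l.map pvTierOf).filterMap (fun t => t) := by
    simp only [List.mem_filterMap]; exact ⟨some v, h, rfl⟩
  cases hm : PySem.List.max? ((l.map pvTierOf).filterMap (fun t => t)) (fun y => y) with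
  | none =>
    rw [PySem.List.max?_eq_none_iff] at hm
    rw [hm] at hv
    cases hv
  | some m =>
    simp only [Option.getD_some]
    exact PySem.List.max?_isMax hm v hv

theorem pvBest_mem (l : List (List (String × String))) (h : pvBest l ≠ 0) :
    some (pvBest l) ∈ l.map pvTierOf := by
  unfold pvBest at *
  cases hm : PySem.List.max? ((l.map pvTierOf).filterMap (fun t => t)) (fun y => y) with
  | none =>
    rw [hm] at h
    exact absurd rfl h
  | some m =>
    simp only [Option.getD_some]
    have hmem := PySem.List.max?_mem hm
    simp only [List.mem_filterMap] at hmem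
    obtain ⟨t, ht, hteq⟩ := hmem
    cases hteq
    exact ht

-- when the best value is unchanged by appending an entry, so is the whole canonical result
theorem pvRes_append_stable (l : List (List (String × String))) (e : List (String × String))
    (hb : pvBest (l ++ [e]) = pvBest l) : pvRes (l ++ [e]) = pvRes l := by
  unfold pvRes
  rw [hb]
  split_ifs with h
  · rfl
  · obtain ⟨k, hk⟩ := Option.isSome_iff_exists.mp
      ((PySem.List.index?_isSome_iff _ _).mpr (pvBest_mem l h))
    obtain ⟨hklen, _, _⟩ := PySem.List.getElem_of_index?_eq_some hk
    have hklen' : k < l.length := by simpa using hklen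
    rw [List.map_append, PySem.List.index?_append_of_mem _ (pvBest_mem l h), hk]
    simp only [Option.getD_some]
    rw [PySem.List.pyGet?_natCast, PySem.List.pyGet?_natCast,
        List.getElem?_append_left hklen']

theorem pvRes_fst (l : List (List (String × String))) : (pvRes l).1 = pvBest l := by
  unfold pvRes; split_ifs with h <;> simp [h]

-- the loop invariant: A's fold computes B's canonical result
theorem pvMain (l : List (List (String × String))) :
    l.foldl pvStepA (0, []) = pvRes l := by
  induction l using List.reverseRecOn with
  | nil => rfl
  | append_singleton l e ih =>
    rw [List.foldl_append, List.foldl_cons, List.foldl_nil, ih, pvStepA_char]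
    cases ht : pvTierOf e with
    | none =>
      simp only [Option.elim]
      exact (pvRes_append_stable l e (by rw [pvBest_append, ht]; rfl)).symm
    | some v =>
      have hv := pvTierOf_mem e v ht
      have hbm : pvBest (l ++ [e]) = max (pvBest l) v := by rw [pvBest_append, ht]; rfl
      simp only [Option.elim]
      rw [pvRes_fst]
      by_cases hlt : pvBest l < v
      · rw [if_pos hlt]
        have hmax : pvBest (l ++ [e]) = v := by rw [hbm]; exact max_eq_right (le_of_lt hlt)
        have hvne : v ≠ 0 := by rcases hv with h | h | h <;> omega
        have hnot : some v ∉ l.map pvTierOf := fun hmem =>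
          absurd (le_pvBest l v hmem) (not_le.mpr hlt)
        unfold pvRes
        rw [hmax, if_neg hvne, List.map_append, List.map_cons, List.map_nil, ht,
            PySem.List.index?_append_singleton_self _ _ hnot]
        simp only [Option.getD_some, List.length_map]
        rw [PySem.List.pyGet?_natCast, List.getElem?_concat_length]
        rfl
      · rw [if_neg hlt]
        exact (pvRes_append_stable l e
          (by rw [hbm]; exact max_eq_left (not_lt.mp hlt))).symm

-- B's port, folded through pvBest/pvRes
theorem pvAlt_eq (l : List (List (String × String))) :
    score_college_alt l = if pvBest l = 0 then (0, ["No education data"]) else pvRes l := by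
  unfold score_college_alt pvRes pvBest
  dsimp only
  split_ifs with h
  · rfl
  · rfl

-- ===== VERDICT (by name: the statement is the Claim_ definition above) =====
theorem score_college_spec : Claim_equal_score_college := by
  intro education _
  unfold Spec_score_college
  rw [pvAlt_eq]
  unfold score_college
  dsimp only
  rw [pvMain]
  by_cases h : pvBest education = 0
  · rw [if_pos h]; unfold pvRes; rw [if_pos h]; rfl
  · rw [if_neg h]; unfold pvRes; rw [if_neg h]; rfl
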